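-- pv_equiv track=rewrite | github.com/infsys-lab/privacy-glue | src/datasets/app_350.py | has_conflicting_labels
-- ===== SOURCE A (Python) =====
-- from collections import defaultdict
-- from typing import Dict, Tuple, Iterable, Any
--
-- def has_conflicting_labels(labels: Iterable[Tuple[Any, Any]]) -> bool:
--     label_mapping = defaultdict(list)
--     for key, value in labels:
--         label_mapping[key].append(value)
--     for key, value in label_mapping.items():
--         if len(value) > 1:
--             return True
--     return False
-- ===== SOURCE B (Python) =====
-- from typing import Tuple, Iterable, Any
--
-- def has_conflicting_labels(labels: Iterable[Tuple[Any, Any]]) -> bool: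
--     seen = set()
--     for key, value in labels:
--         if key in seen:
--             return True
--         seen.add(key)
--     return False
-- ===== Notes on version B (the rewrite author's own statement) =====
-- stated objective: simpler
-- what changed: Replaced the defaultdict-of-lists build followed by a second scan over the table with a single early-exiting pass that keeps only a set of keys seen so far.
import Mathlib
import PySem

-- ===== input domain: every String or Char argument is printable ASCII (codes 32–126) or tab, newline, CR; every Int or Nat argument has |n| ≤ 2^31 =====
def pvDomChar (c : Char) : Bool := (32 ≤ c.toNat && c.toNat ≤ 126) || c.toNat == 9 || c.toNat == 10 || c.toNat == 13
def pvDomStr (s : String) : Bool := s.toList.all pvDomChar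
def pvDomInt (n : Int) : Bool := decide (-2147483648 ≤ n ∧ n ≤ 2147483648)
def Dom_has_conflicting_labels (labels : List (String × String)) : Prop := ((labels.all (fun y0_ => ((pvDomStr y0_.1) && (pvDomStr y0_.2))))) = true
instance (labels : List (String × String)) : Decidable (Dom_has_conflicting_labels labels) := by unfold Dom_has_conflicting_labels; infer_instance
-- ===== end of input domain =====

-- B replaces A's build-a-dict-of-lists-then-scan with a single early-exiting pass over a set of seen keys (simpler).

-- ===== PORT A =====
-- second loop of A: 'for key, value in label_mapping.items(): if len(value) > 1: return True' then 'return False'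
def pvScanA : List (String × List String) → Bool
  | [] => false
  | (_, value) :: rest => if value.length > 1 then true else pvScanA rest

def has_conflicting_labels (labels : List (String × String)) : Bool :=
  let label_mapping : PySem.Dict String (List String) :=
    labels.foldl (fun d kv => d.modify kv.1 [] (fun l => l ++ [kv.2])) PySem.Dict.empty
  pvScanA label_mapping.items

-- ===== PORT B =====
-- B's loop: 'for key, value in labels: if key in seen: return True; seen.add(key)'
def pvScanB (seen : PySem.Set String) : List (String × String) → Bool
  | [] => false
  | (key, _) :: rest => if PySem.Set.contains seen key then true else pvScanB (PySem.Set.add seen key) rest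

def has_conflicting_labels_alt (labels : List (String × String)) : Bool :=
  pvScanB PySem.Set.empty labels

-- ===== PRECONDITION & SPEC =====
def Spec_has_conflicting_labels (labels : List (String × String)) (out : Bool) : Prop := out = has_conflicting_labels_alt labels
instance (labels : List (String × String)) (out : Bool) : Decidable (Spec_has_conflicting_labels labels out) := by unfold Spec_has_conflicting_labels; infer_instance

-- ===== CLAIM (what is proved, stated in full; the proofs are below) =====
def Claim_equal_has_conflicting_labels : Prop := ∀ (labels : List (String × String)), Dom_has_conflicting_labels labels → Spec_has_conflicting_labels labels (has_conflicting_labels labels)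

-- ===== LEMMAS AND PROOFS =====

-- A's second loop is an 'any' over the items
lemma pvScanA_eq_any (ls : List (String × List String)) :
    pvScanA ls = ls.any (fun p => p.2.length > 1) := by
  induction ls with
  | nil => rfl
  | cons p rest ih =>
    obtain ⟨k, v⟩ := p
    simp [pvScanA, ih]

-- B's loop, started from a duplicate-free 'seen', detects a duplicate in seen ++ keys
lemma pvScanB_eq (ls : List (String × String)) : ∀ (seen : PySem.Set String),
    seen.Nodup → pvScanB seen ls = !decide ((seen ++ ls.map Prod.fst).Nodup) := by
  induction ls with
  | nil => intro seen hnd; simp [pvScanB, hnd]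
  | cons p rest ih =>
    intro seen hnd
    obtain ⟨k, v⟩ := p
    by_cases hk : k ∈ seen
    · have hc : PySem.Set.contains seen k = true := (PySem.Set.contains_iff seen k).mpr hk
      simp only [pvScanB, hc, if_true, List.map_cons]
      have hnot : ¬ (seen ++ k :: rest.map Prod.fst).Nodup := fun h =>
        (List.disjoint_of_nodup_append h) hk (by simp)
      simp [hnot]
    · have hc : PySem.Set.contains seen k = false := by
        simpa using (fun h => hk ((PySem.Set.contains_iff seen k).mp h))
      have hadd : PySem.Set.add seen k = seen ++ [k] := PySem.Set.add_of_not_mem hk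
      have hnd' : (seen ++ [k]).Nodup := by
        simp [List.nodup_append, hnd]
        intro a ha hak; exact hk (hak ▸ ha)
      simp only [pvScanB, hc, Bool.false_eq_true, if_false, hadd, ih _ hnd']
      congr 1
      simp [List.append_assoc]

-- A equals "the key list has a duplicate"
lemma portA_eq_dup (labels : List (String × String)) :
    has_conflicting_labels labels = !decide ((labels.map Prod.fst).Nodup) := by
  unfold has_conflicting_labels
  set D := labels.foldl (fun d kv => d.modify kv.1 [] (fun l => l ++ [kv.2])) PySem.Dict.empty with hD
  have hkeys : D.keys = PySem.Set.ofList (labels.map Prod.fst) :=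
    PySem.Dict.keys_foldl_modify_key labels (fun kv => kv.1) ([] : List String)
      (fun _ kv l => l ++ [kv.2]) (PySem.Dict.empty : PySem.Dict String (List String))
  have hndk : D.keys.Nodup := by rw [hkeys]; exact PySem.Set.nodup_ofList _
  have hitems : D.items = D.keys.map (fun k => (k, D.getD k [])) :=
    PySem.Dict.items_eq_map_keys D hndk ([] : List String)
  have hget : ∀ k, D.getD k [] = (labels.filter (fun p => p.1 == k)).map Prod.snd := by
    intro k
    rw [hD, PySem.Dict.getD_foldl_modify_append]
    simp
  rw [pvScanA_eq_any, hitems, List.any_map, hkeys]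
  have hlen : ∀ k : String, (D.getD k []).length = (labels.map Prod.fst).count k := by
    intro k
    rw [hget, List.length_map, List.count_eq_countP, List.countP_map, ← List.countP_eq_length_filter]
    rfl
  by_cases hnodup : (labels.map Prod.fst).Nodup
  · -- no duplicates: every key has count <= 1
    simp only [hnodup, decide_true, Bool.not_true, List.any_eq_false]
    intro p hp
    have := (List.nodup_iff_count_le_one.mp hnodup) p
    simp only [Function.comp, decide_eq_true_eq, hlen p]
    omega
  · -- duplicates exist: some key has count > 1
    simp only [hnodup, decide_false, Bool.not_false, List.any_eq_true]
    rw [List.nodup_iff_count_le_one] at hnodup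
    push Not at hnodup
    obtain ⟨a, ha⟩ := hnodup
    have hmem : a ∈ labels.map Prod.fst := by
      rw [← List.count_pos_iff]; omega
    refine ⟨a, by simp [PySem.Set.mem_ofList, hmem], ?_⟩
    simp only [Function.comp, decide_eq_true_eq, hlen a]
    omega

-- ===== VERDICT (by name: the statement is the Claim_ definition above) =====
theorem has_conflicting_labels_spec : Claim_equal_has_conflicting_labels := by
  intro labels _
  unfold Spec_has_conflicting_labels has_conflicting_labels_alt
  rw [portA_eq_dup, pvScanB_eq labels PySem.Set.empty List.nodup_nil]
  rfl
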